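-- pv_equiv track=rewrite | github.com/emypar/gauge_stack | algo/greedy.py | greedy_match_digit_n
-- ===== SOURCE A (Python) =====
-- def get_digit_n(val, n):
--     digit = val
--     for _ in range(n):
--         digit = digit // 10
--     return digit % 10
--
-- def greedy_match_digit_n(target, n, available_blocks, blocks):
--     digit = get_digit_n(target, n)
--     if digit == 0:
--         return target
--     lookup_blocks = sorted(available_blocks)
--     min_b = lookup_blocks[0]
--     lookup_blocks = reversed(lookup_blocks)
--     for b in lookup_blocks:
--         if b > target:
--             continue
--         b_digit = get_digit_n(b, n)
--         if b_digit == digit and target - b >= min_b: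
--             blocks.append(b)
--             available_blocks.discard(b)
--             return target - b
--     return target
-- ===== SOURCE B (Python) =====
-- def get_digit_n(val, n):
--     digit = val
--     for _ in range(n):
--         digit = digit // 10
--     return digit % 10
--
--
-- def greedy_match_digit_n(target, n, available_blocks, blocks):
--     # One linear scan instead of sort + reverse scan: keep the largest
--     # qualifying block seen so far.  Same mutation of blocks/available_blocks.
--     digit = get_digit_n(target, n)
--     if digit == 0:
--         return target
--     min_b = min(available_blocks)
--     best = None
--     for b in available_blocks:
--         if b <= target and get_digit_n(b, n) == digit and target - b >= min_b:
--             if best is None or b > best: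
--                 best = b
--     if best is None:
--         return target
--     blocks.append(best)
--     available_blocks.discard(best)
--     return target - best
-- ===== Notes on version B (the rewrite author's own statement) =====
-- stated objective: alternative
-- what changed: Replaced sort-descending-then-first-match by a linear min pass plus one linear scan that keeps the largest qualifying block; O(k) passes instead of an O(k log k) sort, though per-element digit extraction dominates so measured runtime is similar.
import Mathlib
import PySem

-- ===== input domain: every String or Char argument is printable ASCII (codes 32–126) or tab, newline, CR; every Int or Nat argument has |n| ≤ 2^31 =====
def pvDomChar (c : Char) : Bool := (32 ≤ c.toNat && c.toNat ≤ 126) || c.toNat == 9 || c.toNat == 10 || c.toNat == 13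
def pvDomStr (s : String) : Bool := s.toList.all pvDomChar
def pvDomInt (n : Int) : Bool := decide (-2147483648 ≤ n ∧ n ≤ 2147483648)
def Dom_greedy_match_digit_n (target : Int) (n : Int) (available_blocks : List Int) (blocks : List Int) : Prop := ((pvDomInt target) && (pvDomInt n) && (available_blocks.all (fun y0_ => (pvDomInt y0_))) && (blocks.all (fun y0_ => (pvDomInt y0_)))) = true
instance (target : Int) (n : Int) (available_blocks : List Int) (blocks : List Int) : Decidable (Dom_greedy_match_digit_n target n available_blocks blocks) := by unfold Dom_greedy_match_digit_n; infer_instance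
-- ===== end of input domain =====

-- B replaces A's sort + descending first-match scan by a linear min pass plus one
-- linear scan keeping the largest qualifying block.  A and B mutate blocks /
-- available_blocks identically in Python; the equivalence proved here is about the
-- return value only.

-- ===== PORT A =====
-- digit = val; for _ in range(n): digit //= 10; return digit % 10
def get_digit_n (val : Int) (n : Int) : Int :=
  PySem.Int.mod ((PySem.List.pyRange 0 n 1).foldl (fun d _ => PySem.Int.floordiv d 10) val) 10

-- the 'for b in lookup_blocks' loop of A (continue on b > target; early return)
def greedyFindA (target : Int) (n : Int) (digit : Int) (min_b : Int) : List Int → Int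
  | [] => target
  | b :: rest =>
      if b > target then greedyFindA target n digit min_b rest
      else if get_digit_n b n = digit ∧ target - b ≥ min_b then target - b
      else greedyFindA target n digit min_b rest

def greedy_match_digit_n (target : Int) (n : Int) (available_blocks : List Int) (blocks : List Int) : Int :=
  let digit := get_digit_n target n
  if digit = 0 then target
  else
    let lookup_blocks := PySem.List.sorted available_blocks (fun x => x) false
    match PySem.List.pyGet? lookup_blocks 0 with
    | none => target    -- IndexError (empty set); excluded by Pre_
    | some min_b => greedyFindA target n digit min_b lookup_blocks.reverse

-- ===== PORT B =====
-- loop body of B: keep the largest block satisfying all three conditions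
def bestStep (target : Int) (n : Int) (digit : Int) (min_b : Int) (best : Option Int) (b : Int) : Option Int :=
  if b ≤ target ∧ get_digit_n b n = digit ∧ target - b ≥ min_b then
    match best with
    | none => some b
    | some m => if b > m then some b else some m
  else best

def greedy_match_digit_n_alt (target : Int) (n : Int) (available_blocks : List Int) (blocks : List Int) : Int :=
  let digit := get_digit_n target n
  if digit = 0 then target
  else
    match PySem.List.min? available_blocks (fun x => x) with
    | none => target    -- min([]) ValueError (empty set); excluded by Pre_
    | some min_b =>
      match available_blocks.foldl (bestStep target n digit min_b) none with
      | none => target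
      | some best => target - best

-- ===== PRECONDITION & SPEC =====
-- closed-form digit of target at decimal position n: target // 10**max(n,0) % 10;
-- exact for EVERY target and n (proved below), used only to state Pre_ without a loop
def fastDigit (target : Int) (n : Int) : Int :=
  PySem.Int.mod (PySem.Int.floordiv target ((10 : Int) ^ n.toNat)) 10

-- Pre_ excludes exactly the inputs where A raises (IndexError on
-- sorted(available_blocks)[0]): an empty available_blocks reached with a
-- non-zero digit of target at position n.  B raises there too (min([])).
def Pre_greedy_match_digit_n (target : Int) (n : Int) (available_blocks : List Int) (blocks : List Int) : Prop :=
  available_blocks ≠ [] ∨ fastDigit target n = 0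
instance (target : Int) (n : Int) (available_blocks : List Int) (blocks : List Int) : Decidable (Pre_greedy_match_digit_n target n available_blocks blocks) := by unfold Pre_greedy_match_digit_n; infer_instance
def pvWitness_greedy_match_digit_n : Int × Int × List Int × List Int := (15, 0, [3, 5], [])
def Spec_greedy_match_digit_n (target : Int) (n : Int) (available_blocks : List Int) (blocks : List Int) (out : Int) : Prop := out = greedy_match_digit_n_alt target n available_blocks blocks
instance (target : Int) (n : Int) (available_blocks : List Int) (blocks : List Int) (out : Int) : Decidable (Spec_greedy_match_digit_n target n available_blocks blocks out) := by unfold Spec_greedy_match_digit_n; infer_instance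

-- ===== CLAIM (what is proved, stated in full; the proofs are below) =====
def Claim_equal_greedy_match_digit_n : Prop := ∀ (target : Int) (n : Int) (available_blocks : List Int) (blocks : List Int), Dom_greedy_match_digit_n target n available_blocks blocks → Pre_greedy_match_digit_n target n available_blocks blocks → Spec_greedy_match_digit_n target n available_blocks blocks (greedy_match_digit_n target n available_blocks blocks)

-- ===== LEMMAS AND PROOFS =====

-- the common qualifying test, as the Boolean both loops decide
def Qb (target : Int) (n : Int) (digit : Int) (min_b : Int) (b : Int) : Bool :=
  decide (b ≤ target ∧ get_digit_n b n = digit ∧ target - b ≥ min_b)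

theorem Qb_true {target n digit min_b b : Int} (hq : Qb target n digit min_b b = true) :
    b ≤ target ∧ get_digit_n b n = digit ∧ target - b ≥ min_b := by
  unfold Qb at hq; exact of_decide_eq_true hq

theorem Qb_of {target n digit min_b b : Int}
    (hq : b ≤ target ∧ get_digit_n b n = digit ∧ target - b ≥ min_b) :
    Qb target n digit min_b b = true := by
  unfold Qb; exact decide_eq_true hq

theorem bestStep_pos {target n digit min_b b : Int}
    (hq : Qb target n digit min_b b = true) (o : Option Int) :
    bestStep target n digit min_b o b =
      (match o with
       | none => some b
       | some m => if b > m then some b else some m) := by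
  unfold bestStep; rw [if_pos (Qb_true hq)]

theorem bestStep_neg {target n digit min_b b : Int}
    (hq : ¬ Qb target n digit min_b b = true) (o : Option Int) :
    bestStep target n digit min_b o b = o := by
  unfold bestStep; rw [if_neg (fun hc => hq (Qb_of hc))]

theorem bestStep_pos_le {target n digit min_b b : Int}
    (hq : Qb target n digit min_b b = true) (o : Option Int) :
    ∃ w, bestStep target n digit min_b o b = some w ∧ b ≤ w ∧ (∀ u, o = some u → u ≤ w) := by
  rw [bestStep_pos hq]
  cases o with
  | none => exact ⟨b, rfl, le_refl _, by simp⟩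
  | some m =>
      by_cases hbm : b > m
      · exact ⟨b, by simp [hbm], le_refl _, by intro u hu; cases hu; omega⟩
      · exact ⟨m, by simp [hbm], by omega, by intro u hu; cases hu; exact le_refl _⟩

-- A's loop is the first qualifying element of the list
theorem findA_eq_find? (target n digit min_b : Int) (l : List Int) :
    greedyFindA target n digit min_b l =
      match l.find? (Qb target n digit min_b) with
      | some b => target - b
      | none => target := by
  induction l with
  | nil => rfl
  | cons b rest ih =>
      by_cases hq : Qb target n digit min_b b = true
      · have hq' := Qb_true hq
        have hb : ¬ b > target := not_lt.mpr hq'.1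
        simp [greedyFindA, hb, hq'.2.1, hq'.2.2, hq]
      · have hqf : Qb target n digit min_b b = false := eq_false_of_ne_true hq
        by_cases hb : b > target
        · simp [greedyFindA, hb, hqf, ih]
        · have hrest : ¬ (get_digit_n b n = digit ∧ target - b ≥ min_b) :=
            fun h => hq (Qb_of ⟨not_lt.mp hb, h⟩)
          simp [greedyFindA, hb, hrest, hqf, ih]

-- On a descending list, the element find? returns bounds every qualifying element
theorem find?_desc_isMax (p : Int → Bool) (l : List Int)
    (hd : l.Pairwise (fun a b => b ≤ a)) (u : Int)
    (hu : l.find? p = some u) : ∀ x ∈ l, p x → x ≤ u := by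
  induction l with
  | nil => simp at hu
  | cons h t ih =>
      rw [List.find?_cons] at hu
      rcases List.pairwise_cons.mp hd with ⟨hht, ht⟩
      cases hph : p h with
      | true =>
          simp [hph] at hu
          subst hu
          intro x hx _
          rcases List.mem_cons.mp hx with hx | hx
          · exact le_of_eq hx
          · exact hht x hx
      | false =>
          simp [hph] at hu
          intro x hx hpx
          rcases List.mem_cons.mp hx with hx | hx
          · subst hx; rw [hph] at hpx; exact absurd hpx (by simp)
          · exact ih ht hu x hx hpx

-- characterisation of B's fold: none iff nothing qualifies and nothing carried
theorem foldl_bestStep_none (target n digit min_b : Int) (xs : List Int) :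
    ∀ o : Option Int,
      (xs.foldl (bestStep target n digit min_b) o = none ↔
        o = none ∧ ∀ b ∈ xs, Qb target n digit min_b b = false) := by
  induction xs with
  | nil => simp
  | cons b t ih =>
      intro o
      simp only [List.foldl_cons]
      rw [ih]
      by_cases hq : Qb target n digit min_b b = true
      · obtain ⟨w, hw, -, -⟩ := bestStep_pos_le hq o
        rw [hw]
        constructor
        · rintro ⟨hs, -⟩; exact absurd hs (by simp)
        · rintro ⟨-, hall⟩
          have := hall b (by simp)
          rw [hq] at this
          exact absurd this (by simp)
      · rw [bestStep_neg hq]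
        constructor
        · rintro ⟨ho, hall⟩
          refine ⟨ho, ?_⟩
          intro x hx
          rcases List.mem_cons.mp hx with hx | hx
          · subst hx; exact eq_false_of_ne_true hq
          · exact hall x hx
        · rintro ⟨ho, hall⟩
          exact ⟨ho, fun x hx => hall x (List.mem_cons_of_mem _ hx)⟩

-- if B's fold returns some v: v came from o or a qualifying element, and v bounds
-- every qualifying element of xs and anything carried in o
theorem foldl_bestStep_some (target n digit min_b : Int) (xs : List Int) :
    ∀ (o : Option Int) (v : Int),
      xs.foldl (bestStep target n digit min_b) o = some v →
      ((o = some v ∨ (v ∈ xs ∧ Qb target n digit min_b v = true)) ∧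
        (∀ b ∈ xs, Qb target n digit min_b b = true → b ≤ v) ∧
        (∀ u, o = some u → u ≤ v)) := by
  induction xs with
  | nil =>
      intro o v h
      simp at h
      subst h
      exact ⟨Or.inl rfl, by simp, fun u hu => by cases hu; exact le_refl _⟩
  | cons b t ih =>
      intro o v h
      simp only [List.foldl_cons] at h
      rcases ih _ v h with ⟨hsrc, hbound, hmono⟩
      by_cases hq : Qb target n digit min_b b = true
      · obtain ⟨w, hw, hbw, hmw⟩ := bestStep_pos_le hq o
        have hwv : w ≤ v := hmono w hw
        refine ⟨?_, ?_, ?_⟩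
        · rcases hsrc with hsrc | hsrc
          · rw [hw] at hsrc
            cases hsrc
            rw [bestStep_pos hq] at hw
            cases o with
            | none => cases hw; exact Or.inr ⟨by simp, hq⟩
            | some m =>
                simp only at hw
                split at hw <;> cases hw
                · exact Or.inr ⟨by simp, hq⟩
                · exact Or.inl rfl
          · exact Or.inr ⟨List.mem_cons_of_mem _ hsrc.1, hsrc.2⟩
        · intro x hx hqx
          rcases List.mem_cons.mp hx with hx | hx
          · subst hx; omega
          · exact hbound x hx hqx
        · intro u hu
          have := hmw u hu
          omega
      · rw [bestStep_neg hq] at hsrc hmono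
        refine ⟨?_, ?_, hmono⟩
        · rcases hsrc with hsrc | hsrc
          · exact Or.inl hsrc
          · exact Or.inr ⟨List.mem_cons_of_mem _ hsrc.1, hsrc.2⟩
        · intro x hx hqx
          rcases List.mem_cons.mp hx with hx | hx
          · subst hx; exact absurd hqx hq
          · exact hbound x hx hqx

-- min of A (sorted head) = min of B (min?)
theorem sorted_head_eq_min? (ab : List Int) (h : ab ≠ []) (hd : Int) (tl : List Int)
    (hs : PySem.List.sorted ab (fun x => x) false = hd :: tl) :
    PySem.List.min? ab (fun x => x) = some hd := by
  cases hm : PySem.List.min? ab (fun x => x) with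
  | none =>
      exact absurd ((PySem.List.min?_eq_none_iff _ _).mp hm) h
  | some m =>
      have hmem : m ∈ ab := PySem.List.min?_mem hm
      have hmin : ∀ y ∈ ab, m ≤ y := fun y hy => PySem.List.min?_isMin hm y hy
      have hhd_le : ∀ y ∈ ab, hd ≤ y := PySem.List.key_head_sorted_le ab (fun x => x) hs
      have hhd_mem : hd ∈ ab := by
        have : hd ∈ PySem.List.sorted ab (fun x => x) false := by rw [hs]; simp
        exact (PySem.List.mem_sorted _ _ _ _).mp this
      have h1 : m ≤ hd := hmin hd hhd_mem
      have h2 : hd ≤ m := hhd_le m hmem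
      rw [le_antisymm h1 h2]

-- iterated floor division by 10 (proof-side view of get_digit_n's loop)
def chop : Nat → Int → Int
  | 0, d => d
  | k+1, d => chop k (PySem.Int.floordiv d 10)

theorem floordiv_ten_eq (d : Int) : PySem.Int.floordiv d 10 = d / 10 :=
  PySem.Int.floordiv_eq_ediv_of_pos (by norm_num)

theorem chop_eq_pow : ∀ (k : Nat) (d : Int), chop k d = PySem.Int.floordiv d ((10 : Int) ^ k) := by
  intro k
  induction k with
  | zero =>
      intro d
      show d = PySem.Int.floordiv d ((10 : Int) ^ 0)
      rw [pow_zero, PySem.Int.floordiv_eq_ediv_of_pos (by norm_num), Int.ediv_one]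
  | succ k ih =>
      intro d
      show chop k (PySem.Int.floordiv d 10) = _
      rw [ih, floordiv_ten_eq,
        PySem.Int.floordiv_eq_ediv_of_pos (show (0:Int) < 10 ^ (k+1) by positivity),
        PySem.Int.floordiv_eq_ediv_of_pos (show (0:Int) < 10 ^ k by positivity),
        Int.ediv_ediv_of_nonneg (by norm_num), pow_succ, mul_comm]

theorem foldl_const_chop (xs : List Int) : ∀ d : Int,
    xs.foldl (fun d _ => PySem.Int.floordiv d 10) d = chop xs.length d := by
  induction xs with
  | nil => intro d; rfl
  | cons x t ih => intro d; simp only [List.foldl_cons, List.length_cons]; exact ih _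

theorem get_digit_n_eq_chop (val n : Int) :
    get_digit_n val n = PySem.Int.mod (chop n.toNat val) 10 := by
  unfold get_digit_n
  rw [foldl_const_chop, PySem.List.length_pyRange_one, sub_zero]

-- fastDigit is exact for EVERY target and n
theorem fastDigit_eq (target n : Int) : fastDigit target n = get_digit_n target n := by
  rw [get_digit_n_eq_chop]
  unfold fastDigit
  rw [← chop_eq_pow]

-- ===== VERDICT (by name: the statement is the Claim_ definition above) =====
theorem greedy_match_digit_n_spec : Claim_equal_greedy_match_digit_n := by
  intro target n ab blocks hdom hpre
  unfold Spec_greedy_match_digit_n greedy_match_digit_n greedy_match_digit_n_alt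
  by_cases h0 : get_digit_n target n = 0
  · simp [h0]
  · simp only [h0, if_false]
    rcases hpre with hab | hab
    swap
    · exact absurd ((fastDigit_eq target n) ▸ hab) h0
    -- ab ≠ []
    set S := PySem.List.sorted ab (fun x => x) false with hS
    have hSne : S ≠ [] := by
      intro hnil
      have := PySem.List.sorted_perm (xs := ab) (key := fun x => x) (rev := false)
      rw [← hS, hnil] at this
      exact hab (this.symm.eq_nil ▸ rfl)
    obtain ⟨hd, tl, hcons⟩ := List.exists_cons_of_ne_nil hSne
    rw [hcons]
    rw [PySem.List.pyGet?_zero_cons]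
    rw [sorted_head_eq_min? ab hab hd tl (hS ▸ hcons)]
    simp only
    rw [findA_eq_find?]
    have hpair : S.Pairwise (fun a b => a ≤ b) := PySem.List.sorted_pairwise ab (fun x => x)
    have hpair_rev : S.reverse.Pairwise (fun a b => b ≤ a) := by
      rw [List.pairwise_reverse]; exact hpair
    cases hF : ab.foldl (bestStep target n (get_digit_n target n) hd) none with
    | none =>
        have hnone := (foldl_bestStep_none target n (get_digit_n target n) hd ab none).mp hF
        have hfind : (hd :: tl).reverse.find? (Qb target n (get_digit_n target n) hd) = none := by
          rw [List.find?_eq_none]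
          intro x hx
          have hxS : x ∈ S := by rw [hcons]; exact List.mem_reverse.mp hx
          have hxab : x ∈ ab := (PySem.List.mem_sorted _ _ _ _).mp (hS ▸ hxS)
          rw [hnone.2 x hxab]
          simp
        rw [hfind]
    | some v =>
        obtain ⟨hsrc, hbound, -⟩ := foldl_bestStep_some target n (get_digit_n target n) hd ab none v hF
        rcases hsrc with hsrc | ⟨hvmem, hvq⟩
        · exact absurd hsrc (by simp)
        have hvS : v ∈ S.reverse := by
          rw [List.mem_reverse]
          exact (PySem.List.mem_sorted _ _ _ _).mpr hvmem
        cases hG : (hd :: tl).reverse.find? (Qb target n (get_digit_n target n) hd) with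
        | none =>
            exfalso
            have := List.find?_eq_none.mp hG v (hcons ▸ hvS)
            exact this hvq
        | some u =>
            have hGS : S.reverse.find? (Qb target n (get_digit_n target n) hd) = some u := by
              rw [hcons]; exact hG
            have huq : Qb target n (get_digit_n target n) hd u = true := List.find?_some hGS
            have humem : u ∈ S.reverse := List.mem_of_find?_eq_some hGS
            have huab : u ∈ ab := (PySem.List.mem_sorted _ _ _ _).mp (List.mem_reverse.mp humem)
            have h1 : u ≤ v := hbound u huab huq
            have h2 : v ≤ u :=
              find?_desc_isMax _ S.reverse hpair_rev u hGS v hvS hvq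
            have : u = v := le_antisymm h1 h2
            rw [this]
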